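-- pv_equiv track=rewrite | github.com/ElmouhiYassine/Adder | CNN Architecture/test_split.py | extract_carry_window
-- ===== SOURCE A (Python) =====
-- def extract_carry_window(acc_vec, K1, U_EXT_WIDTH):
--     # carry lives in bits [K1 .. U_EXT_WIDTH-2] for the split-injection scheme
--     seg = acc_vec[K1:U_EXT_WIDTH-1]
--     if any(t == 0 for t in seg):
--         return 0, 0  # would mean "uncertain"; not possible here
--     val = 0
--     for pos, t in enumerate(seg, start=K1):
--         if t == +1: val |= (1 << pos)
--     return val, (+1 if val > 0 else -1)
-- ===== SOURCE B (Python) =====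
-- def extract_carry_window(acc_vec, K1, U_EXT_WIDTH):
--     # one little-endian fold over the reversed window, then a single shift
--     low = 0
--     for t in reversed(acc_vec[K1:U_EXT_WIDTH - 1]):
--         if t == 0:
--             return 0, 0
--         low = low * 2 + (1 if t == 1 else 0)
--     if low == 0:
--         return 0, -1
--     return low << K1, 1
-- ===== Notes on version B (the rewrite author's own statement) =====
-- stated objective: alternative
-- what changed: B folds the reversed window into a little-endian accumulator (low = low*2 + bit) in one pass that also performs the zero check, then applies a single shift by K1, instead of A's separate any()-scan plus per-position bit masking val |= 1 << pos.
import Mathlib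
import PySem

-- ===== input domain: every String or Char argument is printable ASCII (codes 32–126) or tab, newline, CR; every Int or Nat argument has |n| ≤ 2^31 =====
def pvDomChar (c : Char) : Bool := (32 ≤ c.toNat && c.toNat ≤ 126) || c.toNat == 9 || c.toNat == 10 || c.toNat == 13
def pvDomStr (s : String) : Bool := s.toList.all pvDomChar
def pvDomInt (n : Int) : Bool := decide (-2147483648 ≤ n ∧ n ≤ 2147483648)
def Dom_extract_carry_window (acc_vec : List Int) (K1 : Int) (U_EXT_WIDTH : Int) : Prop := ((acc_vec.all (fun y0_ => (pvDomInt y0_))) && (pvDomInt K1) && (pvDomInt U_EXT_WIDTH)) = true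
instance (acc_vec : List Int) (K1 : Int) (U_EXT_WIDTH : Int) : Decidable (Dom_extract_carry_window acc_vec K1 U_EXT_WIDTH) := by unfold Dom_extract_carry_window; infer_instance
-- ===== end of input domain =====

-- B replaces A's per-position bit masking by a single little-endian fold over the reversed window
-- (zero check merged into the same pass) followed by one shift; objective: alternative decomposition, same cost.

-- ===== PORT A =====
def extract_carry_window (acc_vec : List Int) (K1 : Int) (U_EXT_WIDTH : Int) : Int × Int :=
  let seg := PySem.List.slice acc_vec (some K1) (some (U_EXT_WIDTH - 1))
  if seg.any (fun t => t == 0) then (0, 0)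
  else
    -- 'val |= (1 << pos)': Python raises ValueError on negative pos; Pre_ excludes exactly
    -- those inputs, so '.toNat' is never reached with a negative pos under Pre_.
    let val := (seg.foldl (fun (s : Int × Int) t =>
      (if t = 1 then PySem.Int.bor s.1 ((1 : Int) <<< s.2.toNat) else s.1, s.2 + 1)) (0, K1)).1
    (val, if val > 0 then 1 else -1)

-- ===== PORT B =====
-- B's loop over the reversed window (early return on a 0 entry)
def ecwLoop : List Int → Int → Int → Int × Int
  | [], K1, low => if low = 0 then (0, -1) else (low <<< K1.toNat, 1)
  | t :: rest, K1, low =>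
    if t = 0 then (0, 0) else ecwLoop rest K1 (low * 2 + (if t = 1 then 1 else 0))

def extract_carry_window_alt (acc_vec : List Int) (K1 : Int) (U_EXT_WIDTH : Int) : Int × Int :=
  -- 'low << K1': Python raises ValueError for negative K1 on this path; Pre_ excludes exactly
  -- those inputs, so '.toNat' is never reached with negative K1 under Pre_.
  ecwLoop (PySem.List.slice acc_vec (some K1) (some (U_EXT_WIDTH - 1))).reverse K1 0

-- ===== PRECONDITION & SPEC =====
-- Pre_ excludes exactly the inputs on which Python A raises ValueError ('1 << pos' with a
-- negative position: K1 < 0 while the window has no 0 and contains a +1); B raises there too.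
def Pre_extract_carry_window (acc_vec : List Int) (K1 : Int) (U_EXT_WIDTH : Int) : Prop :=
  0 ≤ K1 ∨ (0 : Int) ∈ PySem.List.slice acc_vec (some K1) (some (U_EXT_WIDTH - 1))
         ∨ (1 : Int) ∉ PySem.List.slice acc_vec (some K1) (some (U_EXT_WIDTH - 1))
instance (acc_vec : List Int) (K1 : Int) (U_EXT_WIDTH : Int) : Decidable (Pre_extract_carry_window acc_vec K1 U_EXT_WIDTH) := by unfold Pre_extract_carry_window; infer_instance

def pvWitness_extract_carry_window : List Int × Int × Int := ([1, -1], 0, 3)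

def Spec_extract_carry_window (acc_vec : List Int) (K1 : Int) (U_EXT_WIDTH : Int) (out : Int × Int) : Prop := out = extract_carry_window_alt acc_vec K1 U_EXT_WIDTH
instance (acc_vec : List Int) (K1 : Int) (U_EXT_WIDTH : Int) (out : Int × Int) : Decidable (Spec_extract_carry_window acc_vec K1 U_EXT_WIDTH out) := by unfold Spec_extract_carry_window; infer_instance

-- ===== CLAIM (what is proved, stated in full; the proofs are below) =====
def Claim_equal_extract_carry_window : Prop := ∀ (acc_vec : List Int) (K1 : Int) (U_EXT_WIDTH : Int), Dom_extract_carry_window acc_vec K1 U_EXT_WIDTH → Pre_extract_carry_window acc_vec K1 U_EXT_WIDTH → Spec_extract_carry_window acc_vec K1 U_EXT_WIDTH (extract_carry_window acc_vec K1 U_EXT_WIDTH)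

-- ===== LEMMAS AND PROOFS =====

-- the little-endian value of the window (1s as bits), the common spec of both loops
def ecwL (l : List Int) : Nat := l.foldr (fun t a => a * 2 + (if t = 1 then 1 else 0)) 0

theorem ecwL_nil : ecwL [] = 0 := rfl
theorem ecwL_cons (t : Int) (l : List Int) :
    ecwL (t :: l) = ecwL l * 2 + (if t = 1 then 1 else 0) := rfl

-- A's fold, characterised over Nat positions
theorem ecw_afold (l : List Int) (p v : Nat) (hv : v < 2 ^ p) :
    (l.foldl (fun (s : Int × Int) t =>
      (if t = 1 then PySem.Int.bor s.1 ((1 : Int) <<< s.2.toNat) else s.1, s.2 + 1))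
      ((v : Int), (p : Int))).1 = ((v + 2 ^ p * ecwL l : Nat) : Int) := by
  induction l generalizing p v with
  | nil => simp [ecwL_nil]
  | cons t rest ih =>
    have hp1 : ((p : Int)) + 1 = (((p + 1 : Nat)) : Int) := by push_cast; ring
    simp only [List.foldl_cons]
    by_cases ht : t = 1
    · have hb : PySem.Int.bor (v : Int) ((1 : Int) <<< ((p : Int)).toNat)
          = (((v + 2 ^ p : Nat)) : Int) := by
        have h1 : (1 : Int) <<< ((p : Int)).toNat = ((2 ^ p : Nat) : Int) := by
          simp [Int.shiftLeft_eq]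
        rw [h1, PySem.Int.bor_natCast]
        have := Nat.two_pow_add_eq_or_of_lt hv 1
        simp only [Nat.mul_one] at this
        rw [Nat.or_comm, ← this, Nat.add_comm]
      rw [if_pos ht, hb, hp1, ih (p + 1) (v + 2 ^ p) (by rw [pow_succ]; omega)]
      rw [ecwL_cons, ht]
      congr 1
      simp only [if_true, pow_succ]
      ring
    · rw [if_neg ht, hp1, ih (p + 1) v (lt_trans hv (by rw [pow_succ]; omega))]
      rw [ecwL_cons]
      congr 1
      simp only [if_neg ht, pow_succ]
      ring

-- A's fold never changes val when the window contains no 1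
theorem ecw_afold_no_one (l : List Int) (s : Int × Int) (h : (1 : Int) ∉ l) :
    (l.foldl (fun (s : Int × Int) t =>
      (if t = 1 then PySem.Int.bor s.1 ((1 : Int) <<< s.2.toNat) else s.1, s.2 + 1)) s).1 = s.1 := by
  induction l generalizing s with
  | nil => rfl
  | cons t rest ih =>
    have ht : ¬ t = 1 := fun h1 => h (h1 ▸ List.mem_cons_self)
    simp only [List.foldl_cons, if_neg ht]
    exact ih _ (fun hm => h (List.mem_cons_of_mem _ hm))

theorem ecwL_no_one (l : List Int) (h : (1 : Int) ∉ l) : ecwL l = 0 := by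
  induction l with
  | nil => rfl
  | cons t rest ih =>
    have ht : ¬ t = 1 := fun h1 => h (h1 ▸ List.mem_cons_self)
    rw [ecwL_cons, if_neg ht, ih (fun hm => h (List.mem_cons_of_mem _ hm))]

-- B's loop on a window containing a 0
theorem ecwLoop_zero (l : List Int) (K1 low : Int) (h : (0 : Int) ∈ l) :
    ecwLoop l K1 low = (0, 0) := by
  induction l generalizing low with
  | nil => cases h
  | cons t rest ih =>
    by_cases ht : t = 0
    · simp [ecwLoop, ht]
    · rcases List.mem_cons.mp h with h0 | h0
      · exact absurd h0.symm ht
      · simp only [ecwLoop, if_neg ht]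
        exact ih _ h0

-- B's loop on a window without 0s, with a Nat accumulator
theorem ecwLoop_no_zero (l : List Int) (K1 : Int) (a : Nat) (h : (0 : Int) ∉ l) :
    ecwLoop l K1 (a : Int)
      = (if (l.foldl (fun (a : Nat) t => a * 2 + (if t = 1 then 1 else 0)) a) = 0 then (0, -1)
         else (((l.foldl (fun (a : Nat) t => a * 2 + (if t = 1 then 1 else 0)) a : Nat) : Int) <<< K1.toNat, 1)) := by
  induction l generalizing a with
  | nil =>
    simp only [List.foldl_nil, ecwLoop]
    by_cases ha : a = 0 <;> simp [ha]
  | cons t rest ih =>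
    have ht : ¬ t = 0 := fun h0 => h (h0 ▸ List.mem_cons_self)
    have hcast : (a : Int) * 2 + (if t = 1 then 1 else 0)
        = (((a * 2 + (if t = 1 then 1 else 0) : Nat)) : Int) := by
      by_cases h1 : t = 1 <;> simp [h1]
    simp only [ecwLoop, if_neg ht, List.foldl_cons, hcast]
    exact ih _ (fun hm => h (List.mem_cons_of_mem _ hm))

-- the reversed foldl of B is the foldr defining ecwL
theorem ecw_rev_foldl (l : List Int) :
    l.reverse.foldl (fun (a : Nat) t => a * 2 + (if t = 1 then 1 else 0)) 0 = ecwL l := by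
  rw [List.foldl_reverse]; rfl

-- ===== VERDICT (by name: the statement is the Claim_ definition above) =====
theorem extract_carry_window_spec : Claim_equal_extract_carry_window := by
  intro acc_vec K1 U_EXT_WIDTH _ hpre
  unfold Spec_extract_carry_window extract_carry_window extract_carry_window_alt
  set seg := PySem.List.slice acc_vec (some K1) (some (U_EXT_WIDTH - 1)) with hseg
  by_cases h0 : (0 : Int) ∈ seg
  · have ha : seg.any (fun t => t == 0) = true := by
      simp only [List.any_eq_true, beq_iff_eq]
      exact ⟨0, h0, rfl⟩
    rw [if_pos ha, ecwLoop_zero _ _ _ (List.mem_reverse.mpr h0)]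
  · have ha : ¬ seg.any (fun t => t == 0) = true := by
      simp only [List.any_eq_true, beq_iff_eq]
      rintro ⟨x, hx, rfl⟩
      exact h0 hx
    rw [if_neg ha]
    have hB := ecwLoop_no_zero seg.reverse K1 0 (fun hm => h0 (List.mem_reverse.mp hm))
    simp only [Nat.cast_zero] at hB
    rw [hB, ecw_rev_foldl]
    rcases le_or_gt 0 K1 with hK | hK
    · -- nonnegative K1: both sides compute 2^K1 * ecwL seg
      have hp : ((K1.toNat : Nat) : Int) = K1 := Int.toNat_of_nonneg hK
      have hA := ecw_afold seg K1.toNat 0 (Nat.two_pow_pos _)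
      simp only [Nat.cast_zero, Nat.zero_add, hp] at hA
      rw [hA]
      by_cases hL : ecwL seg = 0
      · simp [hL]
      · rw [if_neg hL]
        have hpos : (0 : Int) < ((2 ^ K1.toNat * ecwL seg : Nat) : Int) := by
          exact_mod_cast Nat.mul_pos (Nat.two_pow_pos _) (Nat.pos_of_ne_zero hL)
        have hsh : ((ecwL seg : Nat) : Int) <<< K1.toNat = (((2 ^ K1.toNat * ecwL seg : Nat)) : Int) := by
          simp [Int.shiftLeft_eq]
          ring
        simp only [gt_iff_lt, hpos, if_true, hsh]
    · -- negative K1: Pre_ forces the window to contain no 1, so both sides give (0, -1)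
      have h1 : (1 : Int) ∉ seg := by
        rcases hpre with h | h | h
        · omega
        · exact absurd h h0
        · exact h
      rw [ecw_afold_no_one seg _ h1]
      rw [ecwL_no_one seg h1]
      norm_num
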